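-- pv_equiv track=rewrite | github.com/vaveave/advent-of-code | aoc/2023/12/__main__.py | generate_strings_with_nans
-- ===== SOURCE A (Python) =====
-- from itertools import product
--
-- def generate_strings_with_nans(s):
--     unknown_indices = [i for i, char in enumerate(s) if char == "?"]
--
--     possible_values = [".", "#"]
--     replacements = list(product(possible_values, repeat=len(unknown_indices)))
--
--     result_strings = []
--
--     for replacement in replacements:
--         temp_str = list(s)
--         for index, value in zip(unknown_indices, replacement):
--             temp_str[index] = value
--         result_strings.append("".join(temp_str))
--
--     return result_strings
-- ===== SOURCE B (Python) =====
-- def generate_strings_with_nans(s):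
--     # Single right-to-left pass maintaining all completions of the suffix seen so far.
--     results = [""]
--     for ch in reversed(s):
--         if ch == "?":
--             results = ["." + t for t in results] + ["#" + t for t in results]
--         else:
--             results = [ch + t for t in results]
--     return results
-- ===== Notes on version B (the rewrite author's own statement) =====
-- stated objective: simpler
-- what changed: A enumerates '?' positions, materialises the full itertools.product of replacement tuples and patches a char-list per tuple; B is one right-to-left pass that maintains the list of all completions of the current suffix, branching on '?', with no index bookkeeping or tuple product.
import Mathlib
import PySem

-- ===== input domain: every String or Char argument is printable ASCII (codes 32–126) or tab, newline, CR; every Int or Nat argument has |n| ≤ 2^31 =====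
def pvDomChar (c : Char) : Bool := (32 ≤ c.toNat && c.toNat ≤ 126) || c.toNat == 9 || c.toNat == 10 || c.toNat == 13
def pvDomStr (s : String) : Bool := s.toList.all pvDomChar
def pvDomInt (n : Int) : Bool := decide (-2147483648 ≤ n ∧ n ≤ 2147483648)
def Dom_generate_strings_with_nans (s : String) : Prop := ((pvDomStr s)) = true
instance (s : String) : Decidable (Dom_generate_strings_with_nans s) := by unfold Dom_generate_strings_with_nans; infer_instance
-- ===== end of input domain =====

-- B replaces A's product-of-tuples + index patching by one right-to-left pass
-- maintaining all completions of the current suffix (objective: simpler).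


-- ===== PORT A =====
-- list(product(vals, repeat=n)): first coordinate varies slowest, exact itertools order.
def pyProduct (vals : List Char) : Nat → List (List Char)
  | 0 => [[]]
  | n + 1 => vals.flatMap (fun v => (pyProduct vals n).map (v :: ·))

def generate_strings_with_nans (s : String) : List String :=
  let cs := s.toList
  let unknown_indices :=
    ((PySem.List.enumerate cs).filter (fun p => p.2 = '?')).map (·.1)
  let possible_values := ['.', '#']
  let replacements := pyProduct possible_values unknown_indices.length
  replacements.foldl (fun result_strings replacement =>
      let temp_str :=
        (unknown_indices.zip replacement).foldl
          (fun t iv => t.set iv.1.toNat iv.2) cs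
      result_strings ++ [String.mk temp_str]) []

-- ===== PORT B =====
def altStep (ch : Char) (results : List (List Char)) : List (List Char) :=
  if ch = '?' then results.map ('.' :: ·) ++ results.map ('#' :: ·)
  else results.map (ch :: ·)

def generate_strings_with_nans_alt (s : String) : List String :=
  (s.toList.foldr altStep [[]]).map String.mk

-- ===== PRECONDITION & SPEC =====
def Spec_generate_strings_with_nans (s : String) (out : List String) : Prop := out = generate_strings_with_nans_alt s
instance (s : String) (out : List String) : Decidable (Spec_generate_strings_with_nans s out) := by unfold Spec_generate_strings_with_nans; infer_instance

-- ===== CLAIM (what is proved, stated in full; the proofs are below) =====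
def Claim_equal_generate_strings_with_nans : Prop := ∀ (s : String), Dom_generate_strings_with_nans s → Spec_generate_strings_with_nans s (generate_strings_with_nans s)

-- ===== LEMMAS AND PROOFS =====

-- A's '?'-index list, generalized over the enumerate start offset.
def unkA (cs : List Char) (k : Int) : List Int :=
  ((PySem.List.enumerate cs k).filter (fun p => p.2 = '?')).map (·.1)

-- A's patching step.
def fillA (cs : List Char) (ps : List (Int × Char)) : List Char :=
  ps.foldl (fun t iv => t.set iv.1.toNat iv.2) cs

lemma unkA_cons' (c : Char) (cs : List Char) (k : Int) :
    unkA (c :: cs) k = if c = '?' then k :: unkA cs (k + 1) else unkA cs (k + 1) := by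
  unfold unkA
  rw [PySem.List.enumerate_cons]
  by_cases hc : c = '?' <;> simp [hc]

lemma unkA_shift (cs : List Char) : ∀ (k : Int),
    unkA cs (k + 1) = (unkA cs k).map (· + 1) := by
  induction cs with
  | nil => intro k; simp [unkA, PySem.List.enumerate_nil]
  | cons c cs ih =>
    intro k
    rw [unkA_cons', unkA_cons', ih (k + 1)]
    by_cases hc : c = '?' <;> simp [hc]

lemma unkA_cons (c : Char) (cs : List Char) :
    unkA (c :: cs) 0 =
      if c = '?' then (0 : Int) :: (unkA cs 0).map (· + 1) else (unkA cs 0).map (· + 1) := by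
  have h := unkA_shift cs 0
  norm_num at h
  rw [unkA_cons', show (0 : Int) + 1 = 1 by norm_num, h]

lemma nonneg_unkA (cs : List Char) (i : Int) (h : i ∈ unkA cs 0) : 0 ≤ i := by
  simp only [unkA, List.mem_map, List.mem_filter] at h
  obtain ⟨p, ⟨hp, _⟩, rfl⟩ := h
  rw [PySem.List.mem_enumerate_iff] at hp
  obtain ⟨k, _, rfl⟩ := hp
  simp

lemma fill_shift (ps : List (Int × Char)) (c : Char) : ∀ (t : List Char),
    (∀ p ∈ ps, 0 ≤ p.1) →
    ps.foldl (fun u iv => u.set (iv.1 + 1).toNat iv.2) (c :: t)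
      = c :: fillA t ps := by
  induction ps with
  | nil => intro t _; simp [fillA]
  | cons p ps ih =>
    intro t hnn
    have hp : 0 ≤ p.1 := hnn p (by simp)
    have hτ : (p.1 + 1).toNat = p.1.toNat + 1 := by omega
    simp only [List.foldl_cons, hτ, List.set_cons_succ, fillA]
    exact ih _ (fun q hq => hnn q (by simp [hq]))

lemma fillA_shifted (cs : List Char) (c : Char) (idxs : List Int) (repl : List Char)
    (hnn : ∀ i ∈ idxs, 0 ≤ i) :
    fillA (c :: cs) ((idxs.map (· + 1)).zip repl) = c :: fillA cs (idxs.zip repl) := by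
  have hz : (idxs.map (· + 1)).zip repl
      = (idxs.zip repl).map (fun p => (p.1 + 1, p.2)) := by
    rw [List.zip_map_left]; rfl
  rw [fillA, hz, List.foldl_map]
  exact fill_shift _ c cs (fun p hp => by
    have := List.of_mem_zip hp
    exact hnn p.1 this.1)

-- The clean recursive characterization both ports reduce to.
def G : List Char → List (List Char)
  | [] => [[]]
  | c :: cs => altStep c (G cs)

lemma foldr_eq_G (cs : List Char) : cs.foldr altStep [[]] = G cs := by
  induction cs with
  | nil => rfl
  | cons c cs ih => simp [G, ih]

lemma pyProduct_succ (n : Nat) :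
    pyProduct ['.', '#'] (n + 1)
      = (pyProduct ['.', '#'] n).map ('.' :: ·) ++ (pyProduct ['.', '#'] n).map ('#' :: ·) := by
  simp [pyProduct, List.flatMap]

lemma Acore_eq_G (cs : List Char) :
    (pyProduct ['.', '#'] (unkA cs 0).length).map (fun r => fillA cs ((unkA cs 0).zip r))
      = G cs := by
  induction cs with
  | nil => simp [unkA, PySem.List.enumerate_nil, pyProduct, fillA, G]
  | cons c cs ih =>
    have hnn := nonneg_unkA cs
    by_cases hc : c = '?'
    · subst hc
      rw [unkA_cons, if_pos rfl]
      simp only [List.length_cons, List.length_map, pyProduct_succ]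
      rw [List.map_append, List.map_map, List.map_map]
      have h1 : ∀ (v : Char) (r : List Char),
          fillA ('?' :: cs) (((0 : Int) :: (unkA cs 0).map (· + 1)).zip (v :: r))
            = v :: fillA cs ((unkA cs 0).zip r) := by
        intro v r
        show fillA ('?' :: cs) ((0, v) :: ((unkA cs 0).map (· + 1)).zip r) = _
        rw [fillA, List.foldl_cons]
        show (((unkA cs 0).map (· + 1)).zip r).foldl _ (('?' :: cs).set 0 v) = _
        rw [List.set_cons_zero]
        exact fillA_shifted cs v _ r hnn
      rw [G, altStep, if_pos rfl]
      rw [← ih]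
      congr 1 <;> · rw [List.map_map]; apply List.map_congr_left; intro r _
                    simp only [Function.comp_apply]; rw [h1]
    · rw [unkA_cons, if_neg hc]
      simp only [List.length_map]
      have h1 : ∀ r, fillA (c :: cs) (((unkA cs 0).map (· + 1)).zip r)
          = c :: fillA cs ((unkA cs 0).zip r) := fun r => fillA_shifted cs c _ r hnn
      rw [G, altStep, if_neg hc, ← ih, List.map_map]
      apply List.map_congr_left; intro r _
      simp only [Function.comp_apply]; rw [h1]

lemma foldl_append_map {α β : Type} (f : α → β) (rs : List α) :
    rs.foldl (fun acc t => acc ++ [f t]) [] = rs.map f := by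
  have h : ∀ (rs : List α) (acc : List β),
      rs.foldl (fun acc t => acc ++ [f t]) acc = acc ++ rs.map f := by
    intro rs
    induction rs with
    | nil => intro acc; simp
    | cons r rs ih => intro acc; simp [ih]
  simpa using h rs []

-- ===== VERDICT (by name: the statement is the Claim_ definition above) =====
theorem generate_strings_with_nans_spec : Claim_equal_generate_strings_with_nans := by
  intro s _
  show generate_strings_with_nans s = generate_strings_with_nans_alt s
  unfold generate_strings_with_nans generate_strings_with_nans_alt
  rw [foldr_eq_G]
  have h : (pyProduct ['.', '#'] (unkA s.toList 0).length).foldl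
      (fun result_strings replacement =>
        result_strings ++ [String.mk (fillA s.toList ((unkA s.toList 0).zip replacement))]) []
      = (G s.toList).map String.mk := by
    rw [← Acore_eq_G, foldl_append_map]
    simp [List.map_map, Function.comp]
  simpa [unkA, fillA] using h
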